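-- pv_equiv track=rewrite | github.com/VladimirPimenov/VegetationIndexes | xmlPassportParser.py | readTag
-- ===== SOURCE A (Python) =====
-- def readTag(line):
--     tag = ""
--     isTagReading = False
--
--     for symb in line:
--         if(symb == '<'):
--             isTagReading = True
--         elif(symb == '>'):
--             tag += symb
--             break
--
--         if(isTagReading):
--             tag += symb
--
--     return tag
-- ===== SOURCE B (Python) =====
-- def readTag(line):
--     head, sep, _ = line.partition('>')
--     start = head.find('<')
--     body = head[start:] if start != -1 else ''
--     return body + sep
-- ===== Notes on version B (the rewrite author's own statement) =====
-- stated objective: faster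
-- what changed: Replaces A's stateful character-by-character scan (reading flag plus break) with str.partition at the first closing angle bracket followed by one find and a slice of the head, then re-attaching the separator; the work moves from a Python-level loop into C-level string primitives.
import Mathlib
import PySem

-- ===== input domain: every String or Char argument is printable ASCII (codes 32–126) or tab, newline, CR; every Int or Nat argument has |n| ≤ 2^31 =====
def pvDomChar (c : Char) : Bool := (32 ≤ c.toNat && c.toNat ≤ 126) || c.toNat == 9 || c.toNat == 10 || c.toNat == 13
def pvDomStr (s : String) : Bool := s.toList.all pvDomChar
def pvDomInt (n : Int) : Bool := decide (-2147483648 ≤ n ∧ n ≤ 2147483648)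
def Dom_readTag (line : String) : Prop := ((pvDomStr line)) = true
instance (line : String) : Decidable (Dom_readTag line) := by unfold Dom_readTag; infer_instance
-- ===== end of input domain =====

-- B replaces A's stateful character-by-character scan with str.partition at the first '>',
-- one find and one slice of the head, re-attaching the separator.

-- ===== PORT A =====
-- A's for-loop with the `break` and the mutable tag/isTagReading state, step for step.
def readTagGo : List Char → List Char → Bool → List Char
  | [], tag, _ => tag
  | symb :: rest, tag, isTagReading =>
    if symb = '<' then
      -- isTagReading := True, then the trailing `if isTagReading: tag += symb` fires
      readTagGo rest (tag ++ [symb]) true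
    else if symb = '>' then
      tag ++ [symb]   -- tag += symb; break
    else if isTagReading then
      readTagGo rest (tag ++ [symb]) isTagReading
    else
      readTagGo rest tag isTagReading

def readTag (line : String) : String :=
  String.ofList (readTagGo line.toList [] false)

-- ===== PORT B =====
-- line.partition('>') is ported by hand (PySem has no partition); exact: Python's partition
-- splits at the FIRST occurrence, head = line[:i] and sep = '>' when found, else (line, '').
def readTag_alt (line : String) : String :=
  let i := PySem.Str.find line ">"
  let head := if i = -1 then line.toList else PySem.List.slice line.toList none (some i)
  let sep := if i = -1 then ([] : List Char) else ['>']
  let start := PySem.Chars.find head ['<']                                      -- head.find('<')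
  let body := if start ≠ -1 then PySem.List.slice head (some start) none
              else ([] : List Char)                                             -- head[start:] / ''
  String.ofList (body ++ sep)                                                   -- body + sep

-- ===== PRECONDITION & SPEC =====
def Spec_readTag (line : String) (out : String) : Prop := out = readTag_alt line
instance (line : String) (out : String) : Decidable (Spec_readTag line out) := by
  unfold Spec_readTag; infer_instance

-- ===== CLAIM =====
def Claim_equal_readTag : Prop := ∀ (line : String), Dom_readTag line → Spec_readTag line (readTag line)

-- ===== LEMMAS AND PROOFS =====

-- Python str.find of a single character is idxOf (or -1 when absent)
theorem find_go_single (cs : List Char) (c : Char) (k : Nat) :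
    PySem.Chars.find.go [c] cs k =
      if c ∈ cs then ((k + List.idxOf c cs : Nat) : Int) else -1 := by
  induction cs generalizing k with
  | nil => simp [PySem.Chars.find.go]
  | cons h t ih =>
    by_cases hc : h = c
    · subst hc
      simp [PySem.Chars.find.go, List.isPrefixOf]
    · have hmem : c ∈ h :: t ↔ c ∈ t := by simp [Ne.symm hc]
      simp only [PySem.Chars.find.go, List.isPrefixOf]
      rw [ih (k + 1)]
      simp only [hmem, List.idxOf_cons, Bool.cond_eq_ite, Bool.and_true, beq_iff_eq, if_neg hc,
        if_neg (Ne.symm hc)]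
      split_ifs with hm
      · push_cast; omega
      · rfl

theorem find_single (cs : List Char) (c : Char) :
    PySem.Chars.find cs [c] = if c ∈ cs then ((List.idxOf c cs : Nat) : Int) else -1 := by
  rw [PySem.Chars.find, find_go_single]
  simp

-- a character cannot occur in the part of the list before its first occurrence
theorem not_mem_take_of_le_idxOf (l : List Char) (x : Char) (n : Nat)
    (h : n ≤ List.idxOf x l) : x ∉ l.take n := by
  induction l generalizing n with
  | nil => simp
  | cons a t ih =>
    cases n with
    | zero => simp
    | succ m =>
      by_cases ha : a = x
      · subst ha; rw [List.idxOf_cons_self] at h; omega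
      · simp only [List.idxOf_cons, Bool.cond_eq_ite, beq_iff_eq, if_neg ha] at h
        simp only [List.take_succ_cons, List.mem_cons]
        rintro (rfl | hm)
        · exact ha rfl
        · exact ih m (by omega) hm

-- dropping a prefix that lies before the first occurrence shifts idxOf
theorem idxOf_drop (l : List Char) (x : Char) (n : Nat) (h : n ≤ List.idxOf x l) :
    List.idxOf x (l.drop n) = List.idxOf x l - n := by
  induction l generalizing n with
  | nil => simp
  | cons a t ih =>
    cases n with
    | zero => simp
    | succ m =>
      by_cases ha : a = x
      · subst ha; rw [List.idxOf_cons_self] at h; omega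
      · simp only [List.idxOf_cons, Bool.cond_eq_ite, beq_iff_eq, if_neg ha] at h ⊢
        simp only [List.drop_succ_cons]
        rw [ih m (by omega)]
        omega

-- the first occurrence inside a prefix is the first occurrence overall
theorem idxOf_take_of_mem (l : List Char) (x : Char) (n : Nat) (h : x ∈ l.take n) :
    List.idxOf x (l.take n) = List.idxOf x l ∧ List.idxOf x l < n := by
  induction l generalizing n with
  | nil => simp at h
  | cons a t ih =>
    cases n with
    | zero => simp at h
    | succ m =>
      by_cases ha : a = x
      · subst ha
        constructor
        · simp
        · rw [List.idxOf_cons_self]; omega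
      · simp only [List.take_succ_cons, List.mem_cons] at h
        rcases h with h | h
        · exact absurd h.symm ha
        · obtain ⟨h1, h2⟩ := ih m h
          simp only [List.take_succ_cons, List.idxOf_cons, Bool.cond_eq_ite, beq_iff_eq,
            if_neg ha]
          exact ⟨by rw [h1], by omega⟩

-- A's loop in non-reading state skips any prefix free of '<' and '>'
theorem readTagGo_skip (pre rest tag : List Char)
    (h1 : '<' ∉ pre) (h2 : '>' ∉ pre) :
    readTagGo (pre ++ rest) tag false = readTagGo rest tag false := by
  induction pre with
  | nil => rfl
  | cons a t ih =>
    simp only [List.mem_cons, not_or] at h1 h2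
    simp only [List.cons_append, readTagGo, if_neg (Ne.symm h1.1), if_neg (Ne.symm h2.1),
      if_neg (show ¬(false = true) by simp)]
    exact ih h1.2 h2.2

-- A's loop in reading state appends everything up to and including the first '>'
theorem readTagGo_read (suf tag : List Char) :
    readTagGo suf tag true =
      tag ++ suf.take (List.idxOf '>' suf) ++ (if '>' ∈ suf then ['>'] else []) := by
  induction suf generalizing tag with
  | nil => simp [readTagGo]
  | cons c t ih =>
    by_cases hc : c = '>'
    · subst hc
      simp [readTagGo]
    · have hmem : '>' ∈ c :: t ↔ '>' ∈ t := by simp [Ne.symm hc]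
      have hidx : List.idxOf '>' (c :: t) = List.idxOf '>' t + 1 := by
        simp [hc]
      have hstep : readTagGo (c :: t) tag true = readTagGo t (tag ++ [c]) true := by
        by_cases hlt : c = '<'
        · subst hlt; simp [readTagGo]
        · simp [readTagGo, hlt, hc]
      rw [hstep, ih, hidx]
      simp only [hmem]
      simp [List.take_succ_cons]

-- when there is a '>' with no '<' before it, A's loop returns [ '>' ]
theorem readTagGo_gt (cs : List Char) (hg : '>' ∈ cs)
    (h1 : '<' ∉ cs.take (List.idxOf '>' cs)) :
    readTagGo cs [] false = ['>'] := by
  have hn : List.idxOf '>' cs < cs.length := List.idxOf_lt_length_of_mem hg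
  have h2 : '>' ∉ cs.take (List.idxOf '>' cs) :=
    not_mem_take_of_le_idxOf cs '>' _ le_rfl
  have hdrop : cs.drop (List.idxOf '>' cs) = '>' :: cs.drop (List.idxOf '>' cs + 1) := by
    rw [List.drop_eq_getElem_cons hn, List.getElem_idxOf hn]
  conv_lhs => rw [← List.take_append_drop (List.idxOf '>' cs) cs]
  rw [readTagGo_skip _ _ _ h1 h2, hdrop]
  simp [readTagGo]

-- when there is a '<' with no '>' before it, A's loop reads from the first '<'
theorem readTagGo_lt (cs : List Char) (hlt : '<' ∈ cs)
    (h2 : '>' ∉ cs.take (List.idxOf '<' cs)) :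
    readTagGo cs [] false =
      '<' :: (cs.drop (List.idxOf '<' cs + 1)).take (List.idxOf '>' (cs.drop (List.idxOf '<' cs + 1)))
        ++ (if '>' ∈ cs.drop (List.idxOf '<' cs + 1) then ['>'] else []) := by
  have hs : List.idxOf '<' cs < cs.length := List.idxOf_lt_length_of_mem hlt
  have h1 : '<' ∉ cs.take (List.idxOf '<' cs) :=
    not_mem_take_of_le_idxOf cs '<' _ le_rfl
  have hdrop : cs.drop (List.idxOf '<' cs) = '<' :: cs.drop (List.idxOf '<' cs + 1) := by
    rw [List.drop_eq_getElem_cons hs, List.getElem_idxOf hs]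
  conv_lhs => rw [← List.take_append_drop (List.idxOf '<' cs) cs]
  rw [readTagGo_skip _ _ _ h1 h2, hdrop]
  have hstep : readTagGo ('<' :: cs.drop (List.idxOf '<' cs + 1)) [] false
      = readTagGo (cs.drop (List.idxOf '<' cs + 1)) ['<'] true := by
    simp [readTagGo]
  rw [hstep, readTagGo_read]
  simp

-- B's find('>') characterised
theorem alt_find_gt (line : String) :
    PySem.Str.find line ">"
      = if '>' ∈ line.toList then ((List.idxOf '>' line.toList : Nat) : Int) else -1 := by
  rw [PySem.Str.find_eq]
  show PySem.Chars.find line.toList ['>'] = _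
  rw [find_single]

theorem readTag_eq_alt (line : String) : readTag line = readTag_alt line := by
  set cs := line.toList with hcs
  by_cases hg : '>' ∈ cs
  · -- partition found a '>': head = cs.take e, sep = ['>']
    have he : List.idxOf '>' cs < cs.length := List.idxOf_lt_length_of_mem hg
    rw [readTag, readTag_alt]
    simp only [alt_find_gt, ← hcs, if_pos hg]
    rw [if_neg (show ¬((List.idxOf '>' cs : Nat) : Int) = -1 by omega),
      if_neg (show ¬((List.idxOf '>' cs : Nat) : Int) = -1 by omega),
      PySem.List.slice_to_natCast,
      find_single (cs.take (List.idxOf '>' cs)) '<']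
    by_cases hmem : '<' ∈ cs.take (List.idxOf '>' cs)
    · -- first '<' is before the first '>': tag = cs[s : e] ++ ['>']
      obtain ⟨hidxeq, hse⟩ := idxOf_take_of_mem cs '<' _ hmem
      have hlt : '<' ∈ cs := List.mem_of_mem_take hmem
      have hs : List.idxOf '<' cs < cs.length := List.idxOf_lt_length_of_mem hlt
      have hsafe : '>' ∉ cs.take (List.idxOf '<' cs) :=
        not_mem_take_of_le_idxOf cs '>' _ (le_of_lt hse)
      have hdrop : cs.drop (List.idxOf '<' cs) = '<' :: cs.drop (List.idxOf '<' cs + 1) := by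
        rw [List.drop_eq_getElem_cons hs, List.getElem_idxOf hs]
      have hgsuf : '>' ∈ cs.drop (List.idxOf '<' cs + 1) := by
        have hget : (cs.drop (List.idxOf '<' cs + 1))[List.idxOf '>' cs - (List.idxOf '<' cs + 1)]?
            = some '>' := by
          rw [List.getElem?_drop]
          have : List.idxOf '<' cs + 1 + (List.idxOf '>' cs - (List.idxOf '<' cs + 1))
              = List.idxOf '>' cs := by omega
          rw [this, List.getElem?_eq_getElem he, List.getElem_idxOf he]
        exact List.mem_of_getElem? hget
      have hidxsuf : List.idxOf '>' (cs.drop (List.idxOf '<' cs + 1))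
          = List.idxOf '>' cs - (List.idxOf '<' cs + 1) :=
        idxOf_drop cs '>' _ (by omega)
      rw [if_pos hmem, readTagGo_lt cs hlt hsafe,
        if_pos (show ¬((List.idxOf '<' (cs.take (List.idxOf '>' cs)) : Nat) : Int) = -1 by omega),
        PySem.List.slice_from_natCast, hidxeq, List.drop_take, hdrop, if_pos hgsuf, hidxsuf]
      have hcount : List.idxOf '>' cs - List.idxOf '<' cs
          = (List.idxOf '>' cs - (List.idxOf '<' cs + 1)) + 1 := by omega
      rw [hcount, List.take_succ_cons]
    · -- no '<' before the first '>': tag = ['>'], body = ''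
      rw [if_neg hmem, readTagGo_gt cs hg hmem,
        if_neg (show ¬¬((-1 : Int) = -1) from not_not_intro rfl)]
      rfl
  · -- no '>': head is the whole line, sep = ''
    rw [readTag, readTag_alt]
    simp only [alt_find_gt, ← hcs, if_neg hg]
    simp only [if_true]
    rw [find_single cs '<']
    by_cases hlt : '<' ∈ cs
    · -- tag = everything from the first '<'
      have hs : List.idxOf '<' cs < cs.length := List.idxOf_lt_length_of_mem hlt
      have hsafe : '>' ∉ cs.take (List.idxOf '<' cs) :=
        fun hm => hg (List.mem_of_mem_take hm)
      have hgsuf : '>' ∉ cs.drop (List.idxOf '<' cs + 1) :=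
        fun hm => hg (List.mem_of_mem_drop hm)
      have hdrop : cs.drop (List.idxOf '<' cs) = '<' :: cs.drop (List.idxOf '<' cs + 1) := by
        rw [List.drop_eq_getElem_cons hs, List.getElem_idxOf hs]
      rw [if_pos hlt, readTagGo_lt cs hlt hsafe, if_neg hgsuf,
        List.idxOf_eq_length hgsuf, List.take_length,
        if_pos (show ¬((List.idxOf '<' cs : Nat) : Int) = -1 by omega),
        PySem.List.slice_from_natCast, hdrop]
    · -- neither bracket occurs: both return ""
      have hA : readTagGo cs [] false = [] := by
        have := readTagGo_skip cs [] [] hlt hg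
        simpa using this
      rw [if_neg hlt, hA, if_neg (show ¬¬((-1 : Int) = -1) from not_not_intro rfl)]
      rfl

-- ===== VERDICT =====
theorem readTag_spec : Claim_equal_readTag := by
  intro line _
  exact readTag_eq_alt line
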